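-- pv_equiv track=rewrite | github.com/mgiannopoulos24/Leetcode | Python/2038.py | winnerOfGame
-- ===== SOURCE A (Python) =====
-- def winnerOfGame(colors: str) -> bool:
--     # Initialize counters for Alice and Bob's moves
--     alice_moves = 0
--     bob_moves = 0
--
--     # Traverse the string to count valid moves
--     for i in range(1, len(colors) - 1):
--         if colors[i - 1] == colors[i] == colors[i + 1]:
--             if colors[i] == 'A':
--                 alice_moves += 1
--             elif colors[i] == 'B':
--                 bob_moves += 1
--
--     # Alice wins if she has more moves than Bob
--     return alice_moves > bob_moves
-- ===== SOURCE B (Python) =====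
-- def winnerOfGame(colors: str) -> bool:
--     # Run-length decomposition: each maximal run of length L of 'A'/'B'
--     # contributes L-2 moves (when L > 2) to its player.
--     alice = 0
--     bob = 0
--     i = 0
--     n = len(colors)
--     while i < n:
--         j = i + 1
--         while j < n and colors[j] == colors[i]:
--             j += 1
--         length = j - i
--         if length > 2:
--             if colors[i] == 'A':
--                 alice += length - 2
--             elif colors[i] == 'B':
--                 bob += length - 2
--         i = j
--     return alice > bob
-- ===== Notes on version B (the rewrite author's own statement) =====
-- stated objective: alternative
-- what changed: B scans maximal runs of equal characters and adds max(0, L-2) per run arithmetically, instead of A's per-position test of every consecutive triple.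
import Mathlib
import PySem

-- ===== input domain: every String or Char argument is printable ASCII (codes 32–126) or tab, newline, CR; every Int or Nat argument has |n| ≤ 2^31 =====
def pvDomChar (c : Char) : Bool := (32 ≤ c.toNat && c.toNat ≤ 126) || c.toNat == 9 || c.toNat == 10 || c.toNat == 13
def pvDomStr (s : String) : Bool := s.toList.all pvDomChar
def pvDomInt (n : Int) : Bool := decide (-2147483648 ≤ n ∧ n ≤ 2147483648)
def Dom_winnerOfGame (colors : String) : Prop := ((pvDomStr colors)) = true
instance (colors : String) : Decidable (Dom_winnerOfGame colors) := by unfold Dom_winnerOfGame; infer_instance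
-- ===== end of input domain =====

-- B counts moves per maximal run of equal characters (L-2 per run when L > 2) instead of A's per-index triple test; alternative decomposition, same cost.

-- ===== PORT A =====
-- one loop step of A: the triple test at index i, then the nested player test
def stepA (cs : List Char) (ab : Int × Int) (i : Int) : Int × Int :=
  if PySem.List.pyGetD cs (i - 1) ' ' = PySem.List.pyGetD cs i ' ' ∧
     PySem.List.pyGetD cs i ' ' = PySem.List.pyGetD cs (i + 1) ' ' then
    if PySem.List.pyGetD cs i ' ' = 'A' then (ab.1 + 1, ab.2)
    else if PySem.List.pyGetD cs i ' ' = 'B' then (ab.1, ab.2 + 1)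
    else ab
  else ab

def winnerOfGame (colors : String) : Bool :=
  let cs := colors.toList
  let ab := (PySem.List.pyRange 1 ((cs.length : Int) - 1) 1).foldl (stepA cs) (0, 0)
  decide (ab.2 < ab.1)

-- ===== PORT B =====
-- the outer while-loop of Source B: consume one maximal run per step (the inner while = takeWhile / dropWhile)
def altGo : List Char → Int → Int → Int × Int
  | [], alice, bob => (alice, bob)
  | c :: rest, alice, bob =>
    if 2 < 1 + ((rest.takeWhile (fun d => d == c)).length : Int) then
      if c = 'A' then
        altGo (rest.dropWhile (fun d => d == c)) (alice + (1 + ((rest.takeWhile (fun d => d == c)).length : Int) - 2)) bob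
      else if c = 'B' then
        altGo (rest.dropWhile (fun d => d == c)) alice (bob + (1 + ((rest.takeWhile (fun d => d == c)).length : Int) - 2))
      else altGo (rest.dropWhile (fun d => d == c)) alice bob
    else altGo (rest.dropWhile (fun d => d == c)) alice bob
termination_by cs _ _ => cs.length
decreasing_by all_goals
  simp only [List.length_cons]
  have := List.length_dropWhile_le (fun d => d == c) rest
  omega

def winnerOfGame_alt (colors : String) : Bool :=
  let ab := altGo colors.toList 0 0
  decide (ab.2 < ab.1)

-- ===== PRECONDITION & SPEC =====
def Spec_winnerOfGame (colors : String) (out : Bool) : Prop := out = winnerOfGame_alt colors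
instance (colors : String) (out : Bool) : Decidable (Spec_winnerOfGame colors out) := by unfold Spec_winnerOfGame; infer_instance

-- ===== CLAIM (what is proved, stated in full; the proofs are below) =====
def Claim_equal_winnerOfGame : Prop := ∀ (colors : String), Dom_winnerOfGame colors → Spec_winnerOfGame colors (winnerOfGame colors)

-- ===== LEMMAS AND PROOFS =====

/-- contribution of one all-equal triple centred on q -/
def unit3 (q : Char) : Int × Int :=
  if q = 'A' then (1, 0) else if q = 'B' then (0, 1) else (0, 0)

def bump3 (p q r : Char) : Int × Int :=
  if p = q ∧ q = r then unit3 q else (0, 0)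

/-- contribution of one maximal run of character c, length L -/
def bumpN (c : Char) (L : Int) : Int × Int :=
  if 2 < L then (if c = 'A' then (L - 2, 0) else if c = 'B' then (0, L - 2) else (0, 0))
  else (0, 0)

/-- triple-window count, the common reference -/
def T : List Char → Int × Int
  | p :: q :: r :: rest => bump3 p q r + T (q :: r :: rest)
  | _ => (0, 0)

lemma T_short (l : List Char) (h : l.length ≤ 2) : T l = (0, 0) := by
  match l with
  | [] => rfl
  | [_] => rfl
  | [_, _] => rfl
  | _ :: _ :: _ :: _ => simp at h

lemma unit_bump (c : Char) (k : Int) (hk : 1 ≤ k) :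
    unit3 c + bumpN c (1 + k) = bumpN c (2 + k) := by
  simp only [unit3, bumpN]
  split_ifs <;> simp [Prod.ext_iff] <;> omega

lemma T_cons_run (c : Char) (rest : List Char) :
    T (c :: rest)
      = bumpN c (1 + ((rest.takeWhile (fun d => d == c)).length : Int))
        + T (rest.dropWhile (fun d => d == c)) := by
  induction rest with
  | nil => simp [T, bumpN]
  | cons d rest' ih =>
    by_cases hdc : d = c
    · subst hdc
      rcases rest' with _ | ⟨e, rest''⟩
      · simp [T, bumpN]
      · by_cases hec : e = d
        · subst hec
          have h1 : T (e :: e :: e :: rest'') = bump3 e e e + T (e :: e :: rest'') := rfl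
          rw [h1, ih]
          have hb3 : bump3 e e e = unit3 e := by simp [bump3]
          rw [hb3, ← add_assoc]
          have htw : List.takeWhile (fun d => d == e) (e :: e :: rest'')
              = e :: List.takeWhile (fun d => d == e) (e :: rest'') := by
            simp
          have hdw : List.dropWhile (fun d => d == e) (e :: e :: rest'')
              = List.dropWhile (fun d => d == e) (e :: rest'') := by
            simp
          rw [htw, hdw]
          congr 1
          have hk : 1 ≤ ((List.takeWhile (fun d => d == e) (e :: rest'')).length : Int) := by
            simp
          have harg : (1 : Int) + ((e :: List.takeWhile (fun d => d == e) (e :: rest'')).length : Int)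
              = 2 + ((List.takeWhile (fun d => d == e) (e :: rest'')).length : Int) := by
            simp [List.length_cons]; ring
          rw [harg, ← unit_bump e _ hk]
        · have hbe : (e == d) = false := by simp [hec]
          have hde : ¬ d = e := fun h => hec h.symm
          have h1 : T (d :: d :: e :: rest'') = bump3 d d e + T (d :: e :: rest'') := rfl
          rw [h1, ih]
          simp [bump3, hde, hbe, bumpN]
    · have hbd : (d == c) = false := by simp [hdc]
      have hcd : ¬ c = d := fun h => hdc h.symm
      rcases rest' with _ | ⟨e, rest''⟩
      · simp [T, bumpN, hbd]
      · have h1 : T (c :: d :: e :: rest'') = bump3 c d e + T (d :: e :: rest'') := rfl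
        rw [h1]
        simp [bump3, hcd, hbd, bumpN]

lemma altGo_eq (cs : List Char) : ∀ (a b : Int), altGo cs a b = (a, b) + T cs := by
  match cs with
  | [] => intro a b; simp [altGo, T]
  | c :: rest =>
    intro a b
    have hrec := altGo_eq (rest.dropWhile (fun d => d == c))
    rw [T_cons_run c rest]
    simp only [altGo]
    by_cases hL : 2 < 1 + ((rest.takeWhile (fun d => d == c)).length : Int)
    · rw [if_pos hL]
      by_cases hA : c = 'A'
      · rw [if_pos hA, hrec]
        simp only [bumpN, if_pos hL, if_pos hA, Prod.fst_add, Prod.snd_add, Prod.ext_iff]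
        constructor <;> ring
      · rw [if_neg hA]
        by_cases hB : c = 'B'
        · rw [if_pos hB, hrec]
          simp only [bumpN, if_pos hL, if_neg hA, if_pos hB, Prod.fst_add, Prod.snd_add, Prod.ext_iff]
          constructor <;> ring
        · rw [if_neg hB, hrec]
          simp only [bumpN, if_pos hL, if_neg hA, if_neg hB, Prod.fst_add, Prod.snd_add, Prod.ext_iff]
          constructor <;> ring
    · rw [if_neg hL, hrec]
      simp only [bumpN, if_neg hL, Prod.fst_add, Prod.snd_add, Prod.ext_iff]
      constructor <;> ring
termination_by cs.length
decreasing_by all_goals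
  have := List.length_dropWhile_le (fun d => d == c) rest
  simp only [List.length_cons]
  omega

lemma stepA_eq (cs : List Char) (k : Nat) (hk : 1 ≤ k) (h2 : k + 1 < cs.length) (ab : Int × Int) :
    stepA cs ab (k : Int) = ab + bump3 (cs[k - 1]'(by omega)) (cs[k]'(by omega)) (cs[k + 1]'(by omega)) := by
  have e1 : PySem.List.pyGetD cs ((k : Int) - 1) ' ' = cs[k - 1]'(by omega) := by
    rw [PySem.List.pyGetD_eq_getElem cs ' ' (by omega) (by omega)]
    congr 1; omega
  have e2 : PySem.List.pyGetD cs (k : Int) ' ' = cs[k]'(by omega) := by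
    rw [PySem.List.pyGetD_eq_getElem cs ' ' (by omega) (by omega)]
    congr 1
  have e3 : PySem.List.pyGetD cs ((k : Int) + 1) ' ' = cs[k + 1]'(by omega) := by
    rw [PySem.List.pyGetD_eq_getElem cs ' ' (by omega) (by omega)]
    congr 1
  simp only [stepA, e1, e2, e3, bump3, unit3]
  split_ifs <;> simp [Prod.ext_iff]

lemma loopA (cs : List Char) (k : Nat) (hk : 1 ≤ k) (ab : Int × Int) :
    (PySem.List.pyRange (k : Int) ((cs.length : Int) - 1) 1).foldl (stepA cs) ab
      = ab + T (cs.drop (k - 1)) := by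
  by_cases h : (k : Int) < (cs.length : Int) - 1
  · have h2 : k + 1 < cs.length := by omega
    rw [PySem.List.pyRange_one_cons h, List.foldl_cons]
    have hcast : (k : Int) + 1 = ((k + 1 : Nat) : Int) := by push_cast; ring
    rw [hcast, loopA cs (k + 1) (by omega), stepA_eq cs k hk h2]
    simp only [Nat.add_sub_cancel]
    have hk1 : k - 1 + 1 = k := by omega
    have d1 : cs.drop (k - 1) = cs[k - 1]'(by omega) :: cs.drop k := by
      rw [List.drop_eq_getElem_cons (by omega), hk1]
    have d2 : cs.drop k = cs[k]'(by omega) :: cs.drop (k + 1) := List.drop_eq_getElem_cons (by omega)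
    have d3 : cs.drop (k + 1) = cs[k + 1]'(by omega) :: cs.drop (k + 2) := List.drop_eq_getElem_cons (by omega)
    rw [d1, d2, d3]
    have hT : T (cs[k - 1]'(by omega) :: cs[k]'(by omega) :: cs[k + 1]'(by omega) :: cs.drop (k + 2))
        = bump3 (cs[k - 1]'(by omega)) (cs[k]'(by omega)) (cs[k + 1]'(by omega))
          + T (cs[k]'(by omega) :: cs[k + 1]'(by omega) :: cs.drop (k + 2)) := rfl
    rw [hT, add_assoc]
  · rw [PySem.List.pyRange_one_eq_nil (by omega)]
    rw [T_short _ (by simp only [List.length_drop]; omega)]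
    simp
termination_by cs.length - k
decreasing_by omega

-- ===== VERDICT (by name: the statement is the Claim_ definition above) =====
theorem winnerOfGame_spec : Claim_equal_winnerOfGame := by
  intro colors _
  unfold Spec_winnerOfGame
  have hA := loopA colors.toList 1 (le_refl 1) (0, 0)
  simp only [Nat.cast_one, Nat.sub_self, List.drop_zero] at hA
  simp only [winnerOfGame, winnerOfGame_alt, hA, altGo_eq]
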